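-- pv_equiv track=rewrite | github.com/arvarik/gemstack | src/gemstack/tui/tail_app.py | render_phase_bar
-- ===== SOURCE A (Python) =====
-- def render_phase_bar(lifecycle: dict[str, bool], state: str) -> str:
--     """Render a visual pipeline of the 5 phases."""
--     steps = ["Spec", "Trap", "Build", "Audit", "Ship"]
--     parts: list[str] = []
--
--     for step_name in steps:
--         completed = lifecycle.get(step_name, False)
--         if completed:
--             parts.append(f"[green]✅ {step_name}[/green]")
--         elif state == "IN_PROGRESS":
--             # Mark the first uncompleted as active
--             if not any(lifecycle.get(s, False) for s in steps[steps.index(step_name):]):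
--                 parts.append(f"[yellow]▶ {step_name}[/yellow]")
--             else:
--                 parts.append(f"[dim]○ {step_name}[/dim]")
--         else:
--             parts.append(f"[dim]○ {step_name}[/dim]")
--
--     return " → ".join(parts)
-- ===== SOURCE B (Python) =====
-- def render_phase_bar(lifecycle: dict[str, bool], state: str) -> str:
--     """Render a visual pipeline of the 5 phases."""
--     steps = ["Spec", "Trap", "Build", "Audit", "Ship"]
--     last = max((i for i, s in enumerate(steps) if lifecycle.get(s, False)), default=-1)
--     return " → ".join(
--         f"[green]✅ {s}[/green]" if lifecycle.get(s, False)
--         else f"[yellow]▶ {s}[/yellow]" if state == "IN_PROGRESS" and i > last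
--         else f"[dim]○ {s}[/dim]"
--         for i, s in enumerate(steps)
--     )
-- ===== Notes on version B (the rewrite author's own statement) =====
-- stated objective: simpler
-- what changed: B precomputes the index of the last completed step once (max over enumerate, default -1) and builds the bar in one flat comprehension comparing each index against that boundary, instead of A's per-step any() rescan of the tail of the steps list.
import Mathlib
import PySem

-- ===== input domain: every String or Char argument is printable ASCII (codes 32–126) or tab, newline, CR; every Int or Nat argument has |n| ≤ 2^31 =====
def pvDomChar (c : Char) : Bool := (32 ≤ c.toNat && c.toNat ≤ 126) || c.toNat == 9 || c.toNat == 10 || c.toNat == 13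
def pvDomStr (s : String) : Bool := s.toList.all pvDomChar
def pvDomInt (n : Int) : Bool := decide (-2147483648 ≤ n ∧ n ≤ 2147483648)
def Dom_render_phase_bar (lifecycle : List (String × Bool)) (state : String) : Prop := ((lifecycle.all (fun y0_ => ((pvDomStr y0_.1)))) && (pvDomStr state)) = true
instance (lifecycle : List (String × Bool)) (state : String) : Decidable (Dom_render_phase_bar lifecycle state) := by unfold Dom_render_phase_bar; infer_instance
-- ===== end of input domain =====

-- ===== PORT A =====
-- One honest line: B precomputes the index of the last completed step once and does one flat
-- pass, instead of A's per-step any() scan over the tail (simpler; same output).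
def render_phase_bar (lifecycle : List (String × Bool)) (state : String) : String :=
  let steps : List String := ["Spec", "Trap", "Build", "Audit", "Ship"]
  let d := PySem.Dict.mk lifecycle
  let parts : List String := steps.foldl (fun parts step_name =>
    let completed := PySem.Dict.getD d step_name false
    if completed then
      parts ++ ["[green]✅ " ++ step_name ++ "[/green]"]
    else if state = "IN_PROGRESS" then
      -- steps.index(step_name): always found (step_name ∈ steps); getD 0 is unreachable
      let idx : Nat := (PySem.List.index? steps step_name).getD 0
      if !((PySem.List.slice steps (some (idx : Int)) none).any
            (fun s => PySem.Dict.getD d s false)) then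
        parts ++ ["[yellow]▶ " ++ step_name ++ "[/yellow]"]
      else
        parts ++ ["[dim]○ " ++ step_name ++ "[/dim]"]
    else
      parts ++ ["[dim]○ " ++ step_name ++ "[/dim]"]) []
  PySem.Str.join " → " parts

-- ===== PORT B =====
def render_phase_bar_alt (lifecycle : List (String × Bool)) (state : String) : String :=
  let steps : List String := ["Spec", "Trap", "Build", "Audit", "Ship"]
  let d := PySem.Dict.mk lifecycle
  let last : Int := PySem.List.maxD
    ((PySem.List.enumerate steps).filterMap
      (fun p => if PySem.Dict.getD d p.2 false then some p.1 else none))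
    (fun i => i) (-1)
  PySem.Str.join " → "
    ((PySem.List.enumerate steps).map (fun p =>
      if PySem.Dict.getD d p.2 false then "[green]✅ " ++ p.2 ++ "[/green]"
      else if state = "IN_PROGRESS" ∧ p.1 > last then "[yellow]▶ " ++ p.2 ++ "[/yellow]"
      else "[dim]○ " ++ p.2 ++ "[/dim]"))

-- ===== PRECONDITION & SPEC =====
def Spec_render_phase_bar (lifecycle : List (String × Bool)) (state : String) (out : String) : Prop := out = render_phase_bar_alt lifecycle state
instance (lifecycle : List (String × Bool)) (state : String) (out : String) : Decidable (Spec_render_phase_bar lifecycle state out) := by unfold Spec_render_phase_bar; infer_instance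

-- ===== CLAIM (what is proved, stated in full; the proofs are below) =====
def Claim_equal_render_phase_bar : Prop := ∀ (lifecycle : List (String × Bool)) (state : String), Dom_render_phase_bar lifecycle state → Spec_render_phase_bar lifecycle state (render_phase_bar lifecycle state)

-- ===== LEMMAS AND PROOFS =====

-- ===== VERDICT (by name: the statement is the Claim_ definition above) =====
set_option maxHeartbeats 2000000 in
theorem render_phase_bar_spec : Claim_equal_render_phase_bar := by
  intro lifecycle state _
  unfold Spec_render_phase_bar render_phase_bar render_phase_bar_alt
  by_cases hs : state = "IN_PROGRESS" <;>
  by_cases h0 : PySem.Dict.getD (PySem.Dict.mk lifecycle) "Spec" false = true <;>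
  by_cases h1 : PySem.Dict.getD (PySem.Dict.mk lifecycle) "Trap" false = true <;>
  by_cases h2 : PySem.Dict.getD (PySem.Dict.mk lifecycle) "Build" false = true <;>
  by_cases h3 : PySem.Dict.getD (PySem.Dict.mk lifecycle) "Audit" false = true <;>
  by_cases h4 : PySem.Dict.getD (PySem.Dict.mk lifecycle) "Ship" false = true <;>
  simp [hs, h0, h1, h2, h3, h4, PySem.List.enumerate, PySem.List.maxD,
        PySem.List.slice, PySem.List.max?, List.idxOf?, List.findIdx?, List.findIdx?.go]
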